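-- pv_equiv track=rewrite | github.com/Steven-Robertson2229/Counterexamples_to_the_p-t-_adic_Littlewood_Conjecture_Over_Small_Finite_Fields | Main_Code.py | nth_adapted_paperfolding
-- ===== SOURCE A (Python) =====
-- def nth_adapted_paperfolding(n):
--     if n==0:
--         return 0
--     while n-(n//2)*2==0:
--         n=n//2
--     if int(n)%8==1:
--         return 0
--     elif int(n)%8==3:
--         return 1
--     elif int(n)%8==5:
--         return 2
--     else:
--         return 3
-- ===== SOURCE B (Python) =====
-- def nth_adapted_paperfolding(n):
--     if n == 0:
--         return 0
--     t = (n & -n).bit_length() - 1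
--     return (n >> (t + 1)) & 3
-- ===== Notes on version B (the rewrite author's own statement) =====
-- stated objective: simpler
-- what changed: The strip-trailing-zeros while loop and the four-way mod-8 if-chain are replaced by a closed-form bit extraction: compute the trailing-zero count t of n via the low-bit trick and bit_length, then the answer is the two bits of n just above position t.
import Mathlib
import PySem

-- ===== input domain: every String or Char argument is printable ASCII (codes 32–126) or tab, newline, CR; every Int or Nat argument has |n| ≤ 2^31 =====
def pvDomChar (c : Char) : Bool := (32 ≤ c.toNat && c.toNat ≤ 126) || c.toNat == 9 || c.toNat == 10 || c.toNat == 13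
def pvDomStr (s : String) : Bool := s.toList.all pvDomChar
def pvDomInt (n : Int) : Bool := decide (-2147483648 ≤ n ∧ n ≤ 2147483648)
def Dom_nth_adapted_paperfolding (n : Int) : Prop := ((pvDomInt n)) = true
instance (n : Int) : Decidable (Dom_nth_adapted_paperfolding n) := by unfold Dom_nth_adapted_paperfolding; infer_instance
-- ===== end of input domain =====

-- B replaces A's strip-trailing-zeros loop and mod-8 if-chain by a closed-form bit extraction (simpler).

-- ===== PORT A =====
-- A's while loop; the `n ≠ 0` conjunct is only a termination guard: A reaches the
-- loop with n ≠ 0 and stripping halves keep n ≠ 0, so the guard never fires there.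
def pvStripEven (n : Int) : Int :=
  if h : n ≠ 0 ∧ n - PySem.Int.floordiv n 2 * 2 = 0 then
    pvStripEven (PySem.Int.floordiv n 2)
  else n
termination_by n.natAbs
decreasing_by
  obtain ⟨h0, he⟩ := h
  have hd : PySem.Int.floordiv n 2 = n / 2 := PySem.Int.floordiv_eq_ediv_of_pos (by norm_num)
  rw [hd] at he ⊢
  omega

def nth_adapted_paperfolding (n : Int) : Int :=
  if n = 0 then 0
  else
    let m := pvStripEven n
    if PySem.Int.mod m 8 = 1 then 0
    else if PySem.Int.mod m 8 = 3 then 1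
    else if PySem.Int.mod m 8 = 5 then 2
    else 3

-- ===== PORT B =====
def nth_adapted_paperfolding_alt (n : Int) : Int :=
  if n = 0 then 0
  else
    let t : Nat := PySem.Int.bitLength (PySem.Int.band n (-n)) - 1
    PySem.Int.band (n >>> (t + 1)) 3

-- ===== PRECONDITION & SPEC =====
def Spec_nth_adapted_paperfolding (n : Int) (out : Int) : Prop := out = nth_adapted_paperfolding_alt n
instance (n : Int) (out : Int) : Decidable (Spec_nth_adapted_paperfolding n out) := by unfold Spec_nth_adapted_paperfolding; infer_instance

-- ===== CLAIM (what is proved, stated in full; the proofs are below) =====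
def Claim_equal_nth_adapted_paperfolding : Prop := ∀ (n : Int), Dom_nth_adapted_paperfolding n → Spec_nth_adapted_paperfolding n (nth_adapted_paperfolding n)

-- ===== LEMMAS AND PROOFS =====

-- Nat heart of the low-bit identity: for M = 2^t*(2k+1), M &&& (M-1) clears the lowest set bit.
theorem pvLandSub (t k : Nat) :
    (2 ^ t * (2 * k + 1)) &&& (2 ^ t * (2 * k + 1) - 1) = 2 ^ t * (2 * k + 1) - 2 ^ t := by
  induction t with
  | zero =>
    have h1 : 2 * k + 1 = Nat.bit true k := by simp [Nat.bit_val]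
    have h2 : 2 * k = Nat.bit false k := by simp [Nat.bit_val]
    simp only [pow_zero, one_mul, Nat.add_sub_cancel]
    rw [h1, h2, Nat.land_bit]
    simp [Nat.bit_val, Nat.and_self]
  | succ t ih =>
    set M := 2 ^ t * (2 * k + 1) with hM
    have hMpos : 0 < M := by positivity
    have hMle : 2 ^ t ≤ M := Nat.le_mul_of_pos_right _ (by omega)
    have e1 : 2 ^ (t + 1) * (2 * k + 1) = 2 * M := by rw [hM]; ring
    have e2 : 2 * M = Nat.bit false M := by simp [Nat.bit_val]
    have e3 : 2 * M - 1 = Nat.bit true (M - 1) := by simp [Nat.bit_val]; omega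
    rw [e1, e2]
    rw [show Nat.bit false M - 1 = Nat.bit true (M - 1) by rw [← e2, e3]]
    rw [Nat.land_bit, ih]
    simp [Nat.bit_val]
    omega

theorem pvLowbitNat (t k : Nat) :
    2 ^ t * (2 * k + 1) - ((2 ^ t * (2 * k + 1)) &&& (2 ^ t * (2 * k + 1) - 1)) = 2 ^ t := by
  rw [pvLandSub]
  have hle : 2 ^ t ≤ 2 ^ t * (2 * k + 1) := Nat.le_mul_of_pos_right _ (by omega)
  generalize hQ : 2 ^ t = Q at hle ⊢
  generalize hP : Q * (2 * k + 1) = P at hle ⊢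
  omega

-- n & -n extracts the lowest set bit (Python two's-complement semantics).
theorem pvBand_lowbit (t : Nat) (m : Int) (hm : m % 2 = 1) :
    PySem.Int.band (2 ^ t * m) (-(2 ^ t * m)) = 2 ^ t := by
  rcases lt_trichotomy m 0 with hneg | hz | hpos
  · -- m negative odd: -m = 2k+1
    obtain ⟨k, hk⟩ : ∃ k : Nat, m = -(2 * (k : Int) + 1) := ⟨((-m - 1) / 2).toNat, by omega⟩
    have hMpos : 0 < 2 ^ t * (2 * k + 1) := by positivity
    have hn : 2 ^ t * m = -((2 ^ t * (2 * k + 1) : Nat) : Int) := by rw [hk]; push_cast; ring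
    have hb : ¬ (0 ≤ 2 ^ t * m) := by rw [hn]; omega
    have hbn : (0 : Int) ≤ -(2 ^ t * m) := by rw [hn]; omega
    simp only [PySem.Int.band, if_neg hb, if_pos hbn]
    have t1 : (-(2 ^ t * m)).toNat = 2 ^ t * (2 * k + 1) := by rw [hn]; omega
    have t2 : (-(2 ^ t * m) - 1).toNat = 2 ^ t * (2 * k + 1) - 1 := by rw [hn]; omega
    rw [t1, t2, pvLowbitNat t k]
    push_cast
    ring
  · omega
  · -- m positive odd: m = 2k+1
    obtain ⟨k, hk⟩ : ∃ k : Nat, m = 2 * (k : Int) + 1 := ⟨((m - 1) / 2).toNat, by omega⟩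
    have hMpos : 0 < 2 ^ t * (2 * k + 1) := by positivity
    have hn : 2 ^ t * m = ((2 ^ t * (2 * k + 1) : Nat) : Int) := by rw [hk]; push_cast; ring
    have ha : (0 : Int) ≤ 2 ^ t * m := by rw [hn]; omega
    have hb : ¬ (0 ≤ -(2 ^ t * m)) := by rw [hn]; omega
    simp only [PySem.Int.band, if_pos ha, if_neg hb]
    have t1 : (2 ^ t * m).toNat = 2 ^ t * (2 * k + 1) := by rw [hn]; omega
    have t2 : (-(-(2 ^ t * m)) - 1).toNat = 2 ^ t * (2 * k + 1) - 1 := by rw [hn]; omega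
    rw [t1, t2, pvLowbitNat t k]
    push_cast
    ring

theorem pvBitLen_pow (t : Nat) : PySem.Int.bitLength ((2 : Int) ^ t) = t + 1 := by
  induction t with
  | zero => decide
  | succ t ih =>
    rw [PySem.Int.bitLength_of_pos (by positivity)]
    have : PySem.Int.floordiv ((2 : Int) ^ (t + 1)) 2 = (2 : Int) ^ t := by
      rw [PySem.Int.floordiv_eq_ediv_of_pos (by norm_num), pow_succ,
        Int.mul_ediv_cancel _ (by norm_num)]
    rw [this, ih]

theorem pvShift_one (a : Int) : a >>> (1 : Nat) = a / 2 := by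
  cases a with
  | ofNat n =>
    rw [show (Int.ofNat n) >>> (1:Nat) = Int.ofNat (n >>> 1) from rfl, Nat.shiftRight_eq_div_pow]
    simp only [pow_one, Int.ofNat_eq_natCast]
    omega
  | negSucc n =>
    rw [show (Int.negSucc n) >>> (1:Nat) = Int.negSucc (n >>> 1) from rfl, Nat.shiftRight_eq_div_pow]
    simp only [pow_one]
    omega

theorem pvShift_double (a : Int) (k : Nat) : (2 * a) >>> (k + 1) = a >>> k := by
  cases a with
  | ofNat n =>
    rw [show (2 : Int) * Int.ofNat n = Int.ofNat (2 * n) from rfl]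
    rw [show (Int.ofNat (2 * n)) >>> (k + 1) = Int.ofNat ((2 * n) >>> (k + 1)) from rfl,
      show (Int.ofNat n) >>> k = Int.ofNat (n >>> k) from rfl]
    rw [Nat.shiftRight_eq_div_pow, Nat.shiftRight_eq_div_pow]
    have : (2 * n) / 2 ^ (k + 1) = n / 2 ^ k := by
      rw [pow_succ, mul_comm (2 ^ k) 2, ← Nat.div_div_eq_div_mul,
        Nat.mul_div_cancel_left n (by omega : 0 < 2)]
    rw [this]
  | negSucc n =>
    have h2 : (2 : Int) * Int.negSucc n = Int.negSucc (2 * n + 1) := by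
      rw [Int.negSucc_eq, Int.negSucc_eq]; push_cast; ring
    rw [h2]
    rw [show (Int.negSucc (2 * n + 1)) >>> (k + 1) = Int.negSucc ((2 * n + 1) >>> (k + 1)) from rfl,
      show (Int.negSucc n) >>> k = Int.negSucc (n >>> k) from rfl]
    rw [Nat.shiftRight_eq_div_pow, Nat.shiftRight_eq_div_pow]
    have : (2 * n + 1) / 2 ^ (k + 1) = n / 2 ^ k := by
      rw [pow_succ, mul_comm (2 ^ k) 2, ← Nat.div_div_eq_div_mul]
      have : (2 * n + 1) / 2 = n := by omega
      rw [this]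
    rw [this]

theorem pvShift_pow (t : Nat) (m : Int) : (2 ^ t * m) >>> (t + 1) = m >>> (1 : Nat) := by
  induction t with
  | zero => norm_num
  | succ t ih =>
    have : (2 : Int) ^ (t + 1) * m = 2 * (2 ^ t * m) := by ring
    rw [this, pvShift_double, ih]

theorem pvNatAnd_bits (b0 b1 : Bool) (q : Nat) :
    (Nat.bit b0 (Nat.bit b1 q)) &&& 3 = 2 * b1.toNat + b0.toNat := by
  have h3 : (3 : Nat) = Nat.bit true (Nat.bit true 0) := by simp [Nat.bit_val]
  rw [h3, Nat.land_bit, Nat.land_bit, Nat.and_zero]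
  simp [Nat.bit_val]

theorem pvNatAnd3 (v : Nat) : v &&& 3 = v % 4 := by
  have hv : v = Nat.bit (v % 2 == 1) (Nat.bit (v / 2 % 2 == 1) (v / 4)) := by
    rcases (by omega : v % 2 = 0 ∨ v % 2 = 1) with h0 | h0 <;>
    rcases (by omega : v / 2 % 2 = 0 ∨ v / 2 % 2 = 1) with h1 | h1 <;>
      simp [h0, h1, Nat.bit_val] <;> omega
  calc v &&& 3 = (Nat.bit (v % 2 == 1) (Nat.bit (v / 2 % 2 == 1) (v / 4))) &&& 3 := by rw [← hv]
    _ = 2 * (v / 2 % 2 == 1).toNat + (v % 2 == 1).toNat := pvNatAnd_bits _ _ _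
    _ = v % 4 := by
        rcases (by omega : v % 2 = 0 ∨ v % 2 = 1) with h0 | h0 <;>
        rcases (by omega : v / 2 % 2 = 0 ∨ v / 2 % 2 = 1) with h1 | h1 <;>
          simp [h0, h1] <;> omega

theorem pvBand3 (x : Int) : PySem.Int.band x 3 = x % 4 := by
  by_cases hx : (0 : Int) ≤ x
  · simp only [PySem.Int.band, if_pos hx, if_pos (by norm_num : (0 : Int) ≤ 3)]
    rw [show ((3 : Int)).toNat = 3 from rfl, pvNatAnd3]
    omega
  · simp only [PySem.Int.band, if_neg hx, if_pos (by norm_num : (0 : Int) ≤ 3)]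
    rw [show ((3 : Int)).toNat = 3 from rfl, Nat.land_comm, pvNatAnd3]
    omega

theorem pvDecomp : ∀ (N : Nat) (n : Int), n.natAbs ≤ N → n ≠ 0 →
    ∃ (t : Nat) (m : Int), m % 2 = 1 ∧ n = 2 ^ t * m := by
  intro N
  induction N with
  | zero => intro n h h0; omega
  | succ N ih =>
    intro n h h0
    by_cases hp : n % 2 = 1
    · exact ⟨0, n, hp, by ring⟩
    · have h2 : n % 2 = 0 := by omega
      obtain ⟨t, m, hm, he⟩ := ih (n / 2) (by omega) (by omega)
      refine ⟨t + 1, m, hm, ?_⟩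
      have hn : n = 2 * (n / 2) := by omega
      rw [hn, he]; ring

theorem pvStrip_pow (t : Nat) (m : Int) (hm : m % 2 = 1) :
    pvStripEven (2 ^ t * m) = m := by
  induction t with
  | zero =>
    rw [pvStripEven, dif_neg]
    · simp
    · simp only [pow_zero, one_mul, PySem.Int.floordiv_eq_ediv_of_pos (by norm_num : (0:Int) < 2)]
      omega
  | succ t ih =>
    have hfd : PySem.Int.floordiv (2 ^ (t + 1) * m) 2 = 2 ^ t * m := by
      rw [PySem.Int.floordiv_eq_ediv_of_pos (by norm_num), pow_succ, mul_comm ((2:Int) ^ t) 2,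
        mul_assoc, Int.mul_ediv_cancel_left _ (by norm_num)]
    rw [pvStripEven, dif_pos, hfd]
    · exact ih
    · constructor
      · have hm0 : m ≠ 0 := by omega
        positivity
      · rw [hfd]
        have : (2 : Int) ^ (t + 1) * m = 2 * (2 ^ t * m) := by ring
        omega

-- ===== VERDICT (by name: the statement is the Claim_ definition above) =====
theorem nth_adapted_paperfolding_spec : Claim_equal_nth_adapted_paperfolding := by
  intro n _hdom
  unfold Spec_nth_adapted_paperfolding
  by_cases h0 : n = 0
  · simp [nth_adapted_paperfolding, nth_adapted_paperfolding_alt, h0]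
  · obtain ⟨t, m, hm, rfl⟩ := pvDecomp n.natAbs n le_rfl h0
    unfold nth_adapted_paperfolding nth_adapted_paperfolding_alt
    rw [if_neg h0, if_neg h0]
    simp only [pvStrip_pow t m hm, pvBand_lowbit t m hm, pvBitLen_pow, Nat.add_sub_cancel,
      pvShift_pow, pvShift_one, pvBand3,
      PySem.Int.mod_eq_emod_of_pos (show (0:Int) < 8 by norm_num)]
    have h8 : m % 8 = 1 ∨ m % 8 = 3 ∨ m % 8 = 5 ∨ m % 8 = 7 := by omega
    rcases h8 with h | h | h | h <;> simp [h] <;> omega
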